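-- pv_equiv track=rewrite | github.com/GizawAAiT/Competitive_programming | SecondYear2024/A_Advantage.py | advantage
-- ===== SOURCE A (Python) =====
-- def advantage(participants):
--     a, b = 0, 0
--     for p in participants :
--         if p > a:
--             b, a = a, p
--         elif p > b:
--             b = p
--
--     return [p-a if p-a != 0 else a-b for p  in participants]
-- ===== SOURCE B (Python) =====
-- def advantage(participants):
--     # top two scores (floored at 0, as two zero entries) via a single sort
--     vals = sorted([0, 0] + participants, reverse=True)
--     a, b = vals[0], vals[1]
--     return [p - a if p - a != 0 else a - b for p in participants]
-- ===== Notes on version B (the rewrite author's own statement) =====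
-- stated objective: idiomatic
-- what changed: Replaces A's hand-rolled streaming if/elif top-two tracker with a single reverse sort of the list padded with two zeros (A's zero starting floor) and reads the top two values off the front; the final comprehension is unchanged.
import Mathlib
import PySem

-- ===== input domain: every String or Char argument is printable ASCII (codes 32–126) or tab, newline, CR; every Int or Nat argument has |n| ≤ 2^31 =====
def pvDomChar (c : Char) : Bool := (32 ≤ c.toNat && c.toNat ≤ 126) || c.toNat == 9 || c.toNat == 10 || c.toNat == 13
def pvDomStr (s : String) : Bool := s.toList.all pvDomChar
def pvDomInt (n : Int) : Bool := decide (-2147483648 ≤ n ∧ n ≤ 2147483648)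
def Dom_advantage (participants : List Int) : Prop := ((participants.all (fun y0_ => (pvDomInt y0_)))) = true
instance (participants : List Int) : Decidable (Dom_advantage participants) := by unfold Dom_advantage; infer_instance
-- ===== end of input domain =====

-- B replaces A's hand-rolled streaming top-two tracker by one call to sorted(..., reverse=True)
-- (two zero entries reproduce A's zero starting floor); objective: idiomatic, not faster.

-- ===== PORT A =====
-- the loop's state (a, b), updated exactly as A's if/elif does
def advStep (s : Int × Int) (p : Int) : Int × Int :=
  if p > s.1 then (p, s.1) else if p > s.2 then (s.1, p) else s

def advantage (participants : List Int) : List Int :=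
  let ab := participants.foldl advStep (0, 0)
  participants.map (fun p => if p - ab.1 ≠ 0 then p - ab.1 else ab.1 - ab.2)

-- ===== PORT B =====
def advantage_alt (participants : List Int) : List Int :=
  match PySem.List.sorted (([0, 0] : List Int) ++ participants) (fun x => x) true with
  | a :: b :: _ => participants.map (fun p => if p - a ≠ 0 then p - a else a - b)
  | _ => []  -- unreachable: the sorted list always has ≥ 2 elements (vals[0], vals[1] never raise)

-- ===== PRECONDITION & SPEC =====
def Spec_advantage (participants : List Int) (out : List Int) : Prop := out = advantage_alt participants
instance (participants : List Int) (out : List Int) : Decidable (Spec_advantage participants out) := by unfold Spec_advantage; infer_instance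

-- ===== CLAIM (what is proved, stated in full; the proofs are below) =====
def Claim_equal_advantage : Prop := ∀ (participants : List Int), Dom_advantage participants → Spec_advantage participants (advantage participants)

-- ===== LEMMAS AND PROOFS =====

-- inserting into a descending list keeps it descending
theorem adv_ins_pairwise (p : Int) (t : List Int)
    (h : t.Pairwise (fun x y => y ≤ x)) :
    (PySem.List.insertBy (fun a b => decide (b < a)) p t).Pairwise (fun x y => y ≤ x) := by
  induction t with
  | nil => simp [PySem.List.insertBy]
  | cons y ys ih =>
    simp only [PySem.List.insertBy]
    rcases List.pairwise_cons.mp h with ⟨hy, hys⟩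
    by_cases hc : y < p
    · simp only [hc, decide_true, if_true]
      refine List.pairwise_cons.mpr ⟨?_, h⟩
      intro z hz
      rcases List.mem_cons.mp hz with rfl | hz
      · exact le_of_lt hc
      · exact le_trans (hy z hz) (le_of_lt hc)
    · simp only [hc, decide_false]
      refine List.pairwise_cons.mpr ⟨?_, ih hys⟩
      intro z hz
      rcases (PySem.List.mem_insertBy _ _ _ _).mp hz with rfl | hz
      · exact le_of_not_gt hc
      · exact hy z hz

-- A's fold computes exactly the first two entries of the insertion-sort fold
theorem adv_main (ps : List Int) :
    ∀ (a b : Int) (t : List Int),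
    ((a : Int) :: b :: t).Pairwise (fun x y => y ≤ x) →
    ∃ t', List.foldl (fun acc x => PySem.List.insertBy (fun a b => decide (b < a)) x acc) (a :: b :: t) ps
        = (ps.foldl advStep (a, b)).1 :: (ps.foldl advStep (a, b)).2 :: t'
      ∧ ((ps.foldl advStep (a, b)).1 :: (ps.foldl advStep (a, b)).2 :: t').Pairwise (fun x y => y ≤ x) := by
  induction ps with
  | nil => intro a b t h; exact ⟨t, rfl, h⟩
  | cons p ps ih =>
    intro a b t h
    rcases List.pairwise_cons.mp h with ⟨ha, h'⟩
    rcases List.pairwise_cons.mp h' with ⟨hb, ht⟩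
    by_cases h1 : a < p
    · have hstep : advStep (a, b) p = (p, a) := by simp [advStep, h1]
      have hins : PySem.List.insertBy (fun a b => decide (b < a)) p (a :: b :: t)
          = p :: a :: b :: t := by simp [PySem.List.insertBy, h1]
      have hpw : ((p : Int) :: a :: b :: t).Pairwise (fun x y => y ≤ x) := by
        refine List.pairwise_cons.mpr ⟨?_, h⟩
        intro z hz
        rcases List.mem_cons.mp hz with rfl | hz
        · exact le_of_lt h1
        · exact le_trans (ha z hz) (le_of_lt h1)
      simpa [List.foldl_cons, hins, hstep] using ih p a (b :: t) hpw
    · by_cases h2 : b < p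
      · have hstep : advStep (a, b) p = (a, p) := by simp [advStep, h1, h2]
        have hins : PySem.List.insertBy (fun a b => decide (b < a)) p (a :: b :: t)
            = a :: p :: b :: t := by simp [PySem.List.insertBy, h1, h2]
        have hpw : ((a : Int) :: p :: b :: t).Pairwise (fun x y => y ≤ x) := by
          refine List.pairwise_cons.mpr ⟨?_, ?_⟩
          · intro z hz
            rcases List.mem_cons.mp hz with rfl | hz
            · exact le_of_not_gt h1
            · exact ha z hz
          · refine List.pairwise_cons.mpr ⟨?_, h'⟩
            intro z hz
            rcases List.mem_cons.mp hz with rfl | hz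
            · exact le_of_lt h2
            · exact le_trans (hb z hz) (le_of_lt h2)
        simpa [List.foldl_cons, hins, hstep] using ih a p (b :: t) hpw
      · have hstep : advStep (a, b) p = (a, b) := by simp [advStep, h1, h2]
        have hins : PySem.List.insertBy (fun a b => decide (b < a)) p (a :: b :: t)
            = a :: b :: PySem.List.insertBy (fun a b => decide (b < a)) p t := by
          simp [PySem.List.insertBy, h1, h2]
        have hpw : ((a : Int) :: b :: PySem.List.insertBy (fun a b => decide (b < a)) p t).Pairwise
            (fun x y => y ≤ x) := by
          refine List.pairwise_cons.mpr ⟨?_, List.pairwise_cons.mpr ⟨?_, adv_ins_pairwise p t ht⟩⟩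
          · intro z hz
            rcases List.mem_cons.mp hz with rfl | hz
            · exact ha _ (by simp)
            rcases (PySem.List.mem_insertBy _ _ _ _).mp hz with rfl | hz
            · exact le_trans (le_of_not_gt h2) (ha _ (by simp))
            · exact ha z (by simp [hz])
          · intro z hz
            rcases (PySem.List.mem_insertBy _ _ _ _).mp hz with rfl | hz
            · exact le_of_not_gt h2
            · exact hb z hz
        simpa [List.foldl_cons, hins, hstep] using ih a b _ hpw

-- the sorted list of B, written as an insertion fold starting from [0, 0]
theorem adv_sorted_eq (ps : List Int) :
    PySem.List.sorted (([0, 0] : List Int) ++ ps) (fun x => x) true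
      = List.foldl (fun acc x => PySem.List.insertBy (fun a b => decide (b < a)) x acc)
          ([0, 0] : List Int) ps := by
  simp [PySem.List.sorted_rev_eq_foldl_insertBy, PySem.List.insertBy]

-- ===== VERDICT (by name: the statement is the Claim_ definition above) =====
theorem advantage_spec : Claim_equal_advantage := by
  intro ps _
  unfold Spec_advantage advantage advantage_alt
  obtain ⟨t', heq, -⟩ := adv_main ps 0 0 [] (by simp)
  rw [adv_sorted_eq, heq]
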